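-- pv_equiv track=rewrite | github.com/Kunal9-gif/CESC_Aastha.Ai | ReportSupply6.py | fuzzy_match_police_station
-- ===== SOURCE A (Python) =====
-- from typing import Dict, Any, Optional, List
--
-- def fuzzy_match_police_station(user_text: str, stations: list) -> Optional[Dict[str, Any]]:
--     """
--     Case-insensitive substring match of user_text against stndesc values.
--     Returns the best matching station dict {stncd, stndesc} or None.
--     """
--     user_lower = user_text.lower().strip()
--     for stn in stations:
--         if user_lower in stn.get("stndesc", "").lower():
--             return stn
--     for stn in stations:
--         if stn.get("stndesc", "").lower() in user_lower:
--             return stn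
--     return None
-- ===== SOURCE B (Python) =====
-- def fuzzy_match_police_station(user_text: str, stations: list):
--     """Single pass: return first priority-1 match (user in desc) immediately;
--     remember the first priority-2 match (desc in user) as a fallback."""
--     user_lower = user_text.lower().strip()
--     fallback = None
--     for stn in stations:
--         desc = stn.get("stndesc", "").lower()
--         if user_lower in desc:
--             return stn
--         if fallback is None and desc in user_lower:
--             fallback = stn
--     return fallback
-- ===== Notes on version B (the rewrite author's own statement) =====
-- stated objective: simpler
-- what changed: Replaced A's two full passes over stations by a single pass that returns a priority-1 match immediately and carries the first priority-2 match as a fallback, computing each description's lowercase form once.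
import Mathlib
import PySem

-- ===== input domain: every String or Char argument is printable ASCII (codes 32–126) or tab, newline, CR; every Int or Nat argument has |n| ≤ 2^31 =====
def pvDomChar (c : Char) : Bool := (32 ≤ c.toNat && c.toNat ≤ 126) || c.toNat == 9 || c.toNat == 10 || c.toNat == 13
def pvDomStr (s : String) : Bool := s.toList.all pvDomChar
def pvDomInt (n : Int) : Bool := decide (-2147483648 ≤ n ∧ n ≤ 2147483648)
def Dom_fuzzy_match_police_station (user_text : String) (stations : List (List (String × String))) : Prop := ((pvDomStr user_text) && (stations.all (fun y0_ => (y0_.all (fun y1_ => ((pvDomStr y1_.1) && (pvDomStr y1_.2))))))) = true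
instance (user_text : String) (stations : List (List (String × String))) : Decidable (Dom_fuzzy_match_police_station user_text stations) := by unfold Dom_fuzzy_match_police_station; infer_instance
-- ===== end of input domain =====

-- B replaces A's two full passes by one pass with a first-priority-2 fallback, computing each lowered description once (objective: simpler).
-- ===== PORT A =====
-- stn.get("stndesc", "").lower()
def pvDesc (stn : List (String × String)) : String :=
  PySem.Str.lower (PySem.Dict.getD (PySem.Dict.mk stn) "stndesc" "")

-- first Python loop: 'if user_lower in stn.get("stndesc","").lower(): return stn'
def pvLoop1 (u : String) : List (List (String × String)) → Option (List (String × String))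
  | [] => none
  | stn :: rest => if PySem.Str.isIn u (pvDesc stn) then some stn else pvLoop1 u rest

-- second Python loop: 'if stn.get("stndesc","").lower() in user_lower: return stn'
def pvLoop2 (u : String) : List (List (String × String)) → Option (List (String × String))
  | [] => none
  | stn :: rest => if PySem.Str.isIn (pvDesc stn) u then some stn else pvLoop2 u rest

def fuzzy_match_police_station (user_text : String) (stations : List (List (String × String))) : Option (List (String × String)) :=
  let user_lower := PySem.Str.strip (PySem.Str.lower user_text)
  match pvLoop1 user_lower stations with
  | some stn => some stn
  | none => pvLoop2 user_lower stations

-- ===== PORT B =====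
-- B's single loop, carrying the fallback ('fallback' variable of Source B)
def pvScan (u : String) : List (List (String × String)) → Option (List (String × String)) → Option (List (String × String))
  | [], fb => fb
  | stn :: rest, fb =>
    let desc := pvDesc stn
    if PySem.Str.isIn u desc then some stn
    else pvScan u rest (if fb.isNone && PySem.Str.isIn desc u then some stn else fb)

def fuzzy_match_police_station_alt (user_text : String) (stations : List (List (String × String))) : Option (List (String × String)) :=
  let user_lower := PySem.Str.strip (PySem.Str.lower user_text)
  pvScan user_lower stations none

-- ===== PRECONDITION & SPEC =====
def Spec_fuzzy_match_police_station (user_text : String) (stations : List (List (String × String))) (out : Option (List (String × String))) : Prop := out = fuzzy_match_police_station_alt user_text stations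
instance (user_text : String) (stations : List (List (String × String))) (out : Option (List (String × String))) : Decidable (Spec_fuzzy_match_police_station user_text stations out) := by unfold Spec_fuzzy_match_police_station; infer_instance

-- ===== CLAIM (what is proved, stated in full; the proofs are below) =====
def Claim_equal_fuzzy_match_police_station : Prop := ∀ (user_text : String) (stations : List (List (String × String))), Dom_fuzzy_match_police_station user_text stations → Spec_fuzzy_match_police_station user_text stations (fuzzy_match_police_station user_text stations)

-- ===== LEMMAS AND PROOFS =====

-- B's scan with fallback fb equals: first priority-1 match, else fb, else first priority-2 match.
theorem pvScan_eq (u : String) (l : List (List (String × String))) (fb : Option (List (String × String))) :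
    pvScan u l fb =
      match pvLoop1 u l with
      | some s => some s
      | none => match fb with
        | some x => some x
        | none => pvLoop2 u l := by
  induction l generalizing fb with
  | nil => cases fb <;> rfl
  | cons stn rest ih =>
    unfold pvScan pvLoop1 pvLoop2
    cases h1 : PySem.Str.isIn u (pvDesc stn) with
    | true => simp only [h1]; simp
    | false =>
      simp only [h1]
      simp only [Bool.false_eq_true, if_false, ih]
      cases fb with
      | some x => simp
      | none =>
        cases h2 : PySem.Str.isIn (pvDesc stn) u with
        | true => simp only [h2]; simp
        | false => simp only [h2]; simp

-- ===== VERDICT (by name: the statement is the Claim_ definition above) =====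
theorem fuzzy_match_police_station_spec : Claim_equal_fuzzy_match_police_station := by
  intro user_text stations _
  unfold Spec_fuzzy_match_police_station fuzzy_match_police_station fuzzy_match_police_station_alt
  rw [pvScan_eq]
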